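-- pv_equiv track=rewrite | github.com/Lyoug/Agrimotor | Agrimotor.py | _annotated_attacks
-- ===== SOURCE A (Python) =====
-- ATTACK = 'x'
--
-- REST = '-'
--
-- def bar_type_to_attacks(bar_type: str) -> list[bool]:
--     notes = []
--     for char in bar_type:
--         if char == '-':
--             notes.append(REST)
--         else:  # Assume char is a number
--             notes.extend([ATTACK] * int(char))
--     return notes
--
-- def to_attack_list(bar_list: list[str]) -> list[bool]:
--     attack_list = []
--     for bar_type in bar_list:
--         attack_list.extend(bar_type_to_attacks(bar_type))
--     return attack_list
--
-- def _annotated_attacks(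
--         bar_list: list[str],
--         bar_length: int
--     ) -> list[tuple[int, tuple[int, int]]]:
--     attack_list = to_attack_list(bar_list)
--     # Add one last rest to the list so that the loop below takes the last attack
--     # group into account
--     attack_list.append(REST)
--
--     attack_group_length = 0
--     attack_annotations = []
--     # Merge attacks into groups
--     for global_index, note in enumerate(attack_list):
--         if note == ATTACK:
--             attack_group_length += 1
--         else:   # A rest, i.e. the end of an attack group
--             # Figure out where we are in the music then add the annotation
--             attack_start = global_index - attack_group_length
--             bar_index = attack_start // bar_length + 1
--             eighth_note_index = attack_start % bar_length + 1
--             attack_annotations.append(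
--                 (str(attack_group_length), (bar_index, eighth_note_index))
--             )
--             # Get ready for the next group
--             attack_group_length = 0
--     return attack_annotations
-- ===== SOURCE B (Python) =====
-- def _annotated_attacks(bar_list, bar_length):
--     # Single pass over the bar characters; the expanded per-eighth-note attack
--     # list is never built: runs of attacks are added arithmetically.
--     annotations = []
--     pos = 0        # global index in the (virtual) expanded attack list
--     pending = 0    # length of the attack group currently open
--     for bar_type in bar_list:
--         for char in bar_type:
--             if char == '-':
--                 start = pos - pending
--                 annotations.append(
--                     (str(pending),
--                      (start // bar_length + 1, start % bar_length + 1)))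
--                 pos += 1
--                 pending = 0
--             else:
--                 n = int(char)
--                 pos += n
--                 pending += n
--     start = pos - pending
--     annotations.append(
--         (str(pending), (start // bar_length + 1, start % bar_length + 1)))
--     return annotations
-- ===== Notes on version B (the rewrite author's own statement) =====
-- stated objective: alternative
-- what changed: B never materialises the expanded per-eighth-note attack list: it scans the bar characters once, adding each digit's run length arithmetically to a position/pending-group counter, instead of A's expand-then-run-length state machine over every individual note.
import Mathlib
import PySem

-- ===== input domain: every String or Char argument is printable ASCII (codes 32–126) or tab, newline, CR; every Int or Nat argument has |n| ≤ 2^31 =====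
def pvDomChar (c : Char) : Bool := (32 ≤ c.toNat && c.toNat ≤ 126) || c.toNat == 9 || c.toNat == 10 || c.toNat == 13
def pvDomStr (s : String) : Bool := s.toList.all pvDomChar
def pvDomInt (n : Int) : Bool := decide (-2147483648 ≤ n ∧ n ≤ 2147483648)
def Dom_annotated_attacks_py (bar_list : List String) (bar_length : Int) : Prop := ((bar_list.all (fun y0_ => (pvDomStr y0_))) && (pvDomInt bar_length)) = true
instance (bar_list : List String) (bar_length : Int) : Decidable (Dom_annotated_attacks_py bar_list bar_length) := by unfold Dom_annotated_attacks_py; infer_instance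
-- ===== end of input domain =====

-- B avoids building the expanded attack list: one arithmetic pass over the bar characters (alternative algorithm, same asymptotics).

-- ===== PORT A =====
def bar_type_to_attacks (bar_type : String) : List Char :=
  bar_type.toList.foldl
    (fun notes c =>
      if c = '-' then notes ++ ['-']
      else notes ++ List.replicate ((PySem.Int.ofStr? (String.ofList [c])).getD 0).toNat 'x')
    []

def to_attack_list (bar_list : List String) : List Char :=
  bar_list.foldl (fun acc bt => acc ++ bar_type_to_attacks bt) []

def annotated_attacks_py (bar_list : List String) (bar_length : Int) : List (String × (Int × Int)) :=
  let attack_list := to_attack_list bar_list ++ ['-']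
  let st := (PySem.List.enumerate attack_list 0).foldl
    (fun (st : Int × List (String × (Int × Int))) p =>
      if p.2 = 'x' then (st.1 + 1, st.2)
      else
        let attack_start := p.1 - st.1
        (0, st.2 ++ [(PySem.Int.toStr st.1,
          (PySem.Int.floordiv attack_start bar_length + 1,
           PySem.Int.mod attack_start bar_length + 1))]))
    ((0 : Int), ([] : List (String × (Int × Int))))
  st.2

-- ===== PORT B =====
def annotated_attacks_py_alt (bar_list : List String) (bar_length : Int) : List (String × (Int × Int)) :=
  let st := bar_list.foldl
    (fun st bt => bt.toList.foldl
      (fun (st : Int × Int × List (String × (Int × Int))) c =>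
        if c = '-' then
          let start := st.1 - st.2.1
          (st.1 + 1, 0, st.2.2 ++ [(PySem.Int.toStr st.2.1,
            (PySem.Int.floordiv start bar_length + 1,
             PySem.Int.mod start bar_length + 1))])
        else
          let n := ((PySem.Int.ofStr? (String.ofList [c])).getD 0).toNat
          (st.1 + (n : Int), st.2.1 + (n : Int), st.2.2)) st)
    ((0 : Int), (0 : Int), ([] : List (String × (Int × Int))))
  let start := st.1 - st.2.1
  st.2.2 ++ [(PySem.Int.toStr st.2.1,
    (PySem.Int.floordiv start bar_length + 1,
     PySem.Int.mod start bar_length + 1))]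

-- ===== PRECONDITION & SPEC =====
-- Pre_ excludes exactly the inputs where Python A raises: bar_length = 0 (ZeroDivisionError)
-- and any bar character that is neither '-' nor a decimal digit (ValueError from int(char)).
def Pre_annotated_attacks_py (bar_list : List String) (bar_length : Int) : Prop :=
  bar_length ≠ 0 ∧
  (bar_list.all (fun s => s.toList.all (fun c => c == '-' || c.isDigit))) = true
instance (bar_list : List String) (bar_length : Int) : Decidable (Pre_annotated_attacks_py bar_list bar_length) := by unfold Pre_annotated_attacks_py; infer_instance
def pvWitness_annotated_attacks_py : List String × Int := (["2-1", "--"], 4)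

def Spec_annotated_attacks_py (bar_list : List String) (bar_length : Int) (out : List (String × (Int × Int))) : Prop := out = annotated_attacks_py_alt bar_list bar_length
instance (bar_list : List String) (bar_length : Int) (out : List (String × (Int × Int))) : Decidable (Spec_annotated_attacks_py bar_list bar_length out) := by unfold Spec_annotated_attacks_py; infer_instance

-- ===== CLAIM (what is proved, stated in full; the proofs are below) =====
def Claim_equal_annotated_attacks_py : Prop := ∀ (bar_list : List String) (bar_length : Int), Dom_annotated_attacks_py bar_list bar_length → Pre_annotated_attacks_py bar_list bar_length → Spec_annotated_attacks_py bar_list bar_length (annotated_attacks_py bar_list bar_length)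

-- ===== LEMMAS AND PROOFS =====

-- the annotation emitted when a group of length g ends at global index i
def annAt (bl g i : Int) : String × (Int × Int) :=
  (PySem.Int.toStr g,
   (PySem.Int.floordiv (i - g) bl + 1, PySem.Int.mod (i - g) bl + 1))

def cnt (c : Char) : Nat := ((PySem.Int.ofStr? (String.ofList [c])).getD 0).toNat

def exp1 (c : Char) : List Char := if c = '-' then ['-'] else List.replicate (cnt c) 'x'

-- A's run-length loop as a recursion over the notes, index carried explicitly
def runA (bl : Int) : List Char → Int → Int → List (String × (Int × Int)) → Int × List (String × (Int × Int))
  | [], _, g, acc => (g, acc)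
  | c :: cs, i, g, acc =>
      if c = 'x' then runA bl cs (i + 1) (g + 1) acc
      else runA bl cs (i + 1) 0 (acc ++ [annAt bl g i])

-- B's per-character loop as a recursion
def runB (bl : Int) : List Char → Int → Int → List (String × (Int × Int)) → Int × Int × List (String × (Int × Int))
  | [], pos, g, acc => (pos, g, acc)
  | c :: cs, pos, g, acc =>
      if c = '-' then runB bl cs (pos + 1) 0 (acc ++ [annAt bl g pos])
      else runB bl cs (pos + (cnt c : Int)) (g + (cnt c : Int)) acc

lemma foldA_eq_runA (bl : Int) : ∀ (notes : List Char) (i g : Int) (acc : List (String × (Int × Int))),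
    (PySem.List.enumerate notes i).foldl
      (fun (st : Int × List (String × (Int × Int))) p =>
        if p.2 = 'x' then (st.1 + 1, st.2)
        else
          let attack_start := p.1 - st.1
          (0, st.2 ++ [(PySem.Int.toStr st.1,
            (PySem.Int.floordiv attack_start bl + 1,
             PySem.Int.mod attack_start bl + 1))]))
      (g, acc)
      = runA bl notes i g acc := by
  intro notes
  induction notes with
  | nil => intro i g acc; simp [PySem.List.enumerate_nil, runA]
  | cons c cs ih =>
      intro i g acc
      rw [PySem.List.enumerate_cons]
      by_cases h : c = 'x' <;> simp [h, runA, ih, annAt]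

lemma bar_type_to_attacks_eq (bt : String) :
    bar_type_to_attacks bt = bt.toList.flatMap exp1 := by
  unfold bar_type_to_attacks
  rw [PySem.List.foldl_congr_mem _ _ (fun acc c => acc ++ exp1 c) _
        (by intro acc c _; simp only [exp1, cnt]; split_ifs <;> rfl),
      PySem.List.foldl_append_eq_flatMap]
  simp

lemma to_attack_list_eq (bar_list : List String) :
    to_attack_list bar_list = bar_list.flatMap (fun bt => bt.toList.flatMap exp1) := by
  unfold to_attack_list
  rw [PySem.List.foldl_congr_mem _ _ (fun acc bt => acc ++ bt.toList.flatMap exp1) _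
        (by intro acc bt _; rw [bar_type_to_attacks_eq]),
      PySem.List.foldl_append_eq_flatMap]
  simp

lemma runA_replicate (bl : Int) : ∀ (n : Nat) (ys : List Char) (i g : Int) (acc : List (String × (Int × Int))),
    runA bl (List.replicate n 'x' ++ ys) i g acc = runA bl ys (i + (n : Int)) (g + (n : Int)) acc := by
  intro n
  induction n with
  | zero => intro ys i g acc; simp
  | succ m ih =>
      intro ys i g acc
      rw [List.replicate_succ, List.cons_append]
      show runA bl (List.replicate m 'x' ++ ys) (i + 1) (g + 1) acc = _
      rw [ih]
      congr 1 <;> push_cast <;> ring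

lemma runA_chars (bl : Int) : ∀ (cs ys : List Char) (pos g : Int) (acc : List (String × (Int × Int))),
    runA bl (cs.flatMap exp1 ++ ys) pos g acc
      = runA bl ys (runB bl cs pos g acc).1 (runB bl cs pos g acc).2.1 (runB bl cs pos g acc).2.2 := by
  intro cs
  induction cs with
  | nil => intro ys pos g acc; simp [runB]
  | cons c cs ih =>
      intro ys pos g acc
      rw [List.flatMap_cons, List.append_assoc]
      by_cases h : c = '-'
      · subst h
        show runA bl ('-' :: (cs.flatMap exp1 ++ ys)) pos g acc = _
        rw [show runA bl ('-' :: (cs.flatMap exp1 ++ ys)) pos g acc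
              = runA bl (cs.flatMap exp1 ++ ys) (pos + 1) 0 (acc ++ [annAt bl g pos]) from by
              simp [runA]]
        rw [ih]
        simp [runB]
      · rw [show exp1 c = List.replicate (cnt c) 'x' from by simp [exp1, h]]
        rw [runA_replicate, ih]
        simp [runB, h]

lemma runA_bars (bl : Int) : ∀ (bars : List String) (ys : List Char) (st : Int × Int × List (String × (Int × Int))),
    runA bl ((bars.flatMap (fun bt => bt.toList.flatMap exp1)) ++ ys) st.1 st.2.1 st.2.2
      = runA bl ys
          (bars.foldl (fun s bt => runB bl bt.toList s.1 s.2.1 s.2.2) st).1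
          (bars.foldl (fun s bt => runB bl bt.toList s.1 s.2.1 s.2.2) st).2.1
          (bars.foldl (fun s bt => runB bl bt.toList s.1 s.2.1 s.2.2) st).2.2 := by
  intro bars
  induction bars with
  | nil => intro ys st; simp
  | cons bt bars ih =>
      intro ys st
      rw [List.flatMap_cons, List.append_assoc, runA_chars, List.foldl_cons]
      exact ih ys (runB bl bt.toList st.1 st.2.1 st.2.2)

lemma foldB_eq_runB (bl : Int) : ∀ (cs : List Char) (st : Int × Int × List (String × (Int × Int))),
    cs.foldl
      (fun (st : Int × Int × List (String × (Int × Int))) c =>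
        if c = '-' then
          let start := st.1 - st.2.1
          (st.1 + 1, 0, st.2.2 ++ [(PySem.Int.toStr st.2.1,
            (PySem.Int.floordiv start bl + 1,
             PySem.Int.mod start bl + 1))])
        else
          let n := ((PySem.Int.ofStr? (String.ofList [c])).getD 0).toNat
          (st.1 + (n : Int), st.2.1 + (n : Int), st.2.2)) st
      = runB bl cs st.1 st.2.1 st.2.2 := by
  intro cs
  induction cs with
  | nil => intro st; simp [runB]
  | cons c cs ih =>
      intro st
      rw [List.foldl_cons, ih]
      by_cases h : c = '-' <;> simp [runB, h, annAt, cnt]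

-- ===== VERDICT (by name: the statement is the Claim_ definition above) =====
theorem annotated_attacks_py_spec : Claim_equal_annotated_attacks_py := by
  intro bar_list bar_length _ _
  unfold Spec_annotated_attacks_py
  simp only [annotated_attacks_py, annotated_attacks_py_alt]
  rw [foldA_eq_runA, to_attack_list_eq, runA_bars bar_length bar_list ['-'] ((0:Int), (0:Int), [])]
  rw [show (fun (s : Int × Int × List (String × (Int × Int))) (bt : String) => runB bar_length bt.toList s.1 s.2.1 s.2.2)
        = (fun st bt => bt.toList.foldl
            (fun (st : Int × Int × List (String × (Int × Int))) c =>
              if c = '-' then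
                let start := st.1 - st.2.1
                (st.1 + 1, 0, st.2.2 ++ [(PySem.Int.toStr st.2.1,
                  (PySem.Int.floordiv start bar_length + 1,
                   PySem.Int.mod start bar_length + 1))])
              else
                let n := ((PySem.Int.ofStr? (String.ofList [c])).getD 0).toNat
                (st.1 + (n : Int), st.2.1 + (n : Int), st.2.2)) st) from by
        funext st bt; rw [foldB_eq_runB]]
  simp [runA, annAt]
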